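-- pv_equiv track=rewrite | github.com/tommyokoyo/DSA | Hackerearth/Arraysubsets.py | find_maximal
-- ===== SOURCE A (Python) =====
-- from typing import List
--
-- def find_maximal(arr: list) -> List:
--     arr.sort(reverse=True)
--     subset_a = []
--     n = 0
--
--     while arr:
--         subset_a.insert(0, arr.pop(n))
--         if sum(subset_a) > sum(arr):
--             break
--     return subset_a
-- ===== SOURCE B (Python) =====
-- def find_maximal(arr: list):
--     s = sorted(arr, reverse=True)
--     total = sum(s)
--     taken = 0
--     prefix = []
--     for x in s:
--         taken += x
--         prefix.append(x)
--         if 2 * taken > total: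
--             break
--     prefix.reverse()
--     return prefix
-- ===== Notes on version B (the rewrite author's own statement) =====
-- stated objective: alternative
-- what changed: B sorts once and walks the descending list while maintaining a running taken-sum compared against the precomputed total (2*taken > total), instead of A's loop that re-sums both the subset and the remainder and does insert(0)/pop on every iteration; worst case O(n log n) vs O(n^2), but on typical inputs the loop stops early so a timing run showed no 1.5x gain.
import Mathlib
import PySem

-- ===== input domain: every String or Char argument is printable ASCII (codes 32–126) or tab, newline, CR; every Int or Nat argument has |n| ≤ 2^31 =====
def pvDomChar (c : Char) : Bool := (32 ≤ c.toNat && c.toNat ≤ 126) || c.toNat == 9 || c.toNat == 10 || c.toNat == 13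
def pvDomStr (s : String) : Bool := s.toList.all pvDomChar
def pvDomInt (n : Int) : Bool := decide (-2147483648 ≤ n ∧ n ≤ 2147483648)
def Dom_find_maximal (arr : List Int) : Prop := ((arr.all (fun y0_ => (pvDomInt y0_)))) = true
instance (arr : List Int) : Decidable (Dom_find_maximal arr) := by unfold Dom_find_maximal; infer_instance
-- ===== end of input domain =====

-- B sorts once and keeps a running taken-sum against the precomputed total instead of
-- A's per-iteration re-summing with insert(0)/pop; return-value equivalence only:
-- A sorts and empties its argument list in place, B does not mutate it.


-- ===== PORT A =====
-- while arr: subset_a.insert(0, arr.pop(0)); if sum(subset_a) > sum(arr): break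
def findMaximalLoopA : List Int → List Int → List Int
  | [], subset => subset
  | x :: rest, subset =>
    let subset' := x :: subset
    if subset'.sum > rest.sum then subset' else findMaximalLoopA rest subset'

def find_maximal (arr : List Int) : List Int :=
  findMaximalLoopA (PySem.List.sorted arr (fun x => x) true) []

-- ===== PORT B =====
-- for x in s: taken += x; prefix.append(x); if 2*taken > total: break — then pfx.reverse()
def findMaximalLoopB : List Int → Int → Int → List Int → List Int
  | [], _, _, pfx => pfx.reverse
  | x :: rest, total, taken, pfx =>
    let taken' := taken + x
    let pfx' := pfx ++ [x]
    if 2 * taken' > total then pfx'.reverse else findMaximalLoopB rest total taken' pfx'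

def find_maximal_alt (arr : List Int) : List Int :=
  let s := PySem.List.sorted arr (fun x => x) true
  findMaximalLoopB s s.sum 0 []

-- ===== PRECONDITION & SPEC =====
def Spec_find_maximal (arr : List Int) (out : List Int) : Prop := out = find_maximal_alt arr
instance (arr : List Int) (out : List Int) : Decidable (Spec_find_maximal arr out) := by unfold Spec_find_maximal; infer_instance

-- ===== CLAIM (what is proved, stated in full; the proofs are below) =====
def Claim_equal_find_maximal : Prop := ∀ (arr : List Int), Dom_find_maximal arr → Spec_find_maximal arr (find_maximal arr)

-- ===== LEMMAS AND PROOFS =====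
theorem findMaximalLoop_eq (rem pfx : List Int) (taken total : Int)
    (ht : taken = pfx.sum) (htot : total = taken + rem.sum) :
    findMaximalLoopA rem pfx.reverse = findMaximalLoopB rem total taken pfx := by
  induction rem generalizing pfx taken with
  | nil => simp [findMaximalLoopA, findMaximalLoopB]
  | cons x rest ih =>
    simp only [findMaximalLoopA, findMaximalLoopB]
    have hsum : (x :: pfx.reverse).sum = taken + x := by
      simp [ht, List.sum_reverse]; ring
    have hiff : ((x :: pfx.reverse).sum > rest.sum) ↔ (2 * (taken + x) > total) := by
      simp only [hsum, htot, List.sum_cons]; omega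
    by_cases h : 2 * (taken + x) > total
    · rw [if_pos (hiff.mpr h), if_pos h]; simp
    · rw [if_neg (fun hh => h (hiff.mp hh)), if_neg h]
      simpa using ih (pfx ++ [x]) (taken + x) (by simp [ht]) (by simp [htot]; ring)

-- ===== VERDICT (by name: the statement is the Claim_ definition above) =====
theorem find_maximal_spec : Claim_equal_find_maximal := by
  intro arr _
  unfold Spec_find_maximal find_maximal find_maximal_alt
  simpa using findMaximalLoop_eq (PySem.List.sorted arr (fun x => x) true) [] 0
    (PySem.List.sorted arr (fun x => x) true).sum rfl (by simp)
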